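-- pv_equiv track=rewrite | github.com/Rolavilla80/ComputationalForensicLinguistics | analyze_features.py | find_snippets
-- ===== SOURCE A (Python) =====
-- def find_snippets(text: str, feat: str, window: int = 60, max_snips: int = 2):
--     """Return up to max_snips snippets showing feat in context."""
--     out = []
--     if not isinstance(text, str) or not feat:
--         return out
--     start = 0
--     while len(out) < max_snips:
--         i = text.find(feat, start)
--         if i == -1:
--             break
--         a = max(0, i - window)
--         b = min(len(text), i + len(feat) + window)
--         snippet = text[a:b].replace("\n", " ")
--         out.append(snippet)
--         start = i + len(feat)
--     return out
-- ===== SOURCE B (Python) =====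
-- def find_snippets(text: str, feat: str, window: int = 60, max_snips: int = 2):
--     """Return up to max_snips snippets showing feat in context."""
--     if not isinstance(text, str) or not feat:
--         return []
--     # Phase 1: split the text by the feature; the occurrence positions are
--     # recovered as prefix sums over the parts (no search loop, no counter).
--     parts = text.split(feat)
--     positions = []
--     p = 0
--     for part in parts[:-1]:
--         p += len(part)
--         positions.append(p)
--         p += len(feat)
--     # Phase 2: truncate to max_snips and map each position to its snippet.
--     n, k = len(text), len(feat)
--     return [text[max(0, j - window):min(n, j + k + window)].replace("\n", " ")
--             for j in positions[:max(0, max_snips)]]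
-- ===== Notes on version B (the rewrite author's own statement) =====
-- stated objective: alternative
-- what changed: B replaces A's find-and-count while loop by a delimiter-split pipeline: text.split(feat) once, occurrence positions recovered as prefix sums of the part lengths, truncated to max_snips, then mapped to snippets.
import Mathlib
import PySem

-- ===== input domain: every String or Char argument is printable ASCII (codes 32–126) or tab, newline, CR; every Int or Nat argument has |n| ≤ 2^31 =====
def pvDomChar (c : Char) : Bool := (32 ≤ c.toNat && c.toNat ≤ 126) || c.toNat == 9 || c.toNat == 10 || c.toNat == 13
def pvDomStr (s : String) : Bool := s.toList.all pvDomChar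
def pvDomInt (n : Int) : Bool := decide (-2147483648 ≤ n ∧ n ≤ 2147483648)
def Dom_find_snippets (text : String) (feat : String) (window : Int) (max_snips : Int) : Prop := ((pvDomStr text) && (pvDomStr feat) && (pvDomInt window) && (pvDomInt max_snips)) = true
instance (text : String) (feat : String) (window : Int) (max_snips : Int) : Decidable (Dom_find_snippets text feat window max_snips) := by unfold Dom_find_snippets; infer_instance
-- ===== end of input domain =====

-- B splits the text on the feature once and recovers the occurrence positions as prefix
-- sums of the part lengths, then truncates and maps to snippets; alternative, same cost.

-- ===== PORT A =====
-- A's while loop: fuel = max_snips.toNat (out grows by exactly 1 per iteration, so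
-- 'len(out) < max_snips' is exactly 'fuel > 0'); text.find(feat, start) = Chars.findFrom.
def loopA (t f : List Char) (window : Int) (start : Nat) : Nat → List String
  | 0 => []
  | rem + 1 =>
    let i := PySem.Chars.findFrom t f (start : Int)
    if i = -1 then []
    else
      let a := max 0 (i - window)
      let b := min (t.length : Int) (i + f.length + window)
      String.ofList (PySem.Chars.replace (PySem.Chars.slice t (some a) (some b)) ['\n'] [' ']) ::
        loopA t f window (i.toNat + f.length) rem

def find_snippets (text : String) (feat : String) (window : Int) (max_snips : Int) : List String :=
  if feat.toList = [] then []
  else loopA text.toList feat.toList window 0 max_snips.toNat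

-- ===== PORT B =====
-- text.split(feat) for nonempty feat, ported by hand (exact: Python cuts at the leftmost
-- occurrence and repeats on the rest); fuel = t.length + 1 suffices since each step
-- removes at least one character.
def splitB (t f : List Char) : Nat → List (List Char)
  | 0 => [t]
  | fuel + 1 =>
    let i := PySem.Chars.find t f
    if i = -1 then [t]
    else t.take i.toNat :: splitB (t.drop (i.toNat + f.length)) f fuel

-- prefix sums of the part lengths: the occurrence positions (all parts but the last)
def posB (k : Nat) (p : Nat) : List (List Char) → List Nat
  | [] => []
  | [_] => []
  | part :: rest => (p + part.length) :: posB k (p + part.length + k) rest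

def snipB (t : List Char) (k : Nat) (window : Int) (j : Nat) : String :=
  String.ofList (PySem.Chars.replace
    (PySem.Chars.slice t (some (max 0 ((j : Int) - window)))
      (some (min (t.length : Int) ((j : Int) + (k : Int) + window)))) ['\n'] [' '])

def find_snippets_alt (text : String) (feat : String) (window : Int) (max_snips : Int) : List String :=
  if feat.toList = [] then []
  else
    ((posB feat.toList.length 0 (splitB text.toList feat.toList (text.toList.length + 1))).take
        max_snips.toNat).map (snipB text.toList feat.toList.length window)

-- ===== PRECONDITION & SPEC =====
def Spec_find_snippets (text : String) (feat : String) (window : Int) (max_snips : Int) (out : List String) : Prop := out = find_snippets_alt text feat window max_snips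
instance (text : String) (feat : String) (window : Int) (max_snips : Int) (out : List String) : Decidable (Spec_find_snippets text feat window max_snips out) := by unfold Spec_find_snippets; infer_instance

-- ===== CLAIM (what is proved, stated in full; the proofs are below) =====
def Claim_equal_find_snippets : Prop := ∀ (text : String) (feat : String) (window : Int) (max_snips : Int), Dom_find_snippets text feat window max_snips → Spec_find_snippets text feat window max_snips (find_snippets text feat window max_snips)

-- ===== LEMMAS AND PROOFS =====

theorem splitB_ne_nil (t f : List Char) (fuel : Nat) : splitB t f fuel ≠ [] := by
  cases fuel with
  | zero => simp [splitB]
  | succ n =>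
    simp only [splitB]
    split <;> simp

-- the main correspondence: A's loop from `start` equals B's pipeline on the suffix
theorem loopA_eq (t f : List Char) (w : Int) (hf : f ≠ []) :
    ∀ fuel start rem, start ≤ t.length → (t.length - start) + 1 ≤ fuel →
    loopA t f w start rem =
      ((posB f.length start (splitB (t.drop start) f fuel)).take rem).map (snipB t f.length w) := by
  intro fuel
  induction fuel with
  | zero => intro start rem h1 h2; omega
  | succ fuel ih =>
    intro start rem hs hfuel
    have hk : 0 < f.length := List.length_pos_of_ne_nil hf
    simp only [splitB]
    by_cases hfind : PySem.Chars.find (List.drop start t) f = -1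
    · -- no further occurrence: both sides empty
      have hff : PySem.Chars.findFrom t f (start : Int) = -1 := by
        rw [PySem.Chars.findFrom_natCast t f start hs, hfind]; simp
      cases rem with
      | zero => simp [loopA, hfind, posB]
      | succ r =>
        have : List.drop start t = [] ∨ True := Or.inr trivial
        simp [loopA, hff, hfind, posB]
    · -- an occurrence at start + i
      have h0 : 0 ≤ PySem.Chars.find (List.drop start t) f := by
        have := PySem.Chars.neg_one_le_find (List.drop start t) f; omega
      set iN := (PySem.Chars.find (List.drop start t) f).toNat with hiN
      have hieq : PySem.Chars.find (List.drop start t) f = (iN : Int) := by omega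
      obtain ⟨hpre, -⟩ := PySem.Chars.find_spec h0
      have hocc : iN + f.length ≤ t.length - start := by
        have := hpre.length_le
        simp only [List.drop_drop, List.length_drop] at this
        omega
      have hff : PySem.Chars.findFrom t f (start : Int) = ((start + iN : Nat) : Int) := by
        rw [PySem.Chars.findFrom_natCast t f start hs, hieq]
        have : ¬ ((iN : Int) = -1) := by omega
        simp only [this, if_false]
        push_cast; ring
      have htake : (List.take iN (List.drop start t)).length = iN := by
        simp [List.length_drop]; omega
      have hdrop : List.drop (iN + f.length) (List.drop start t) =
          List.drop (start + iN + f.length) t := by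
        rw [List.drop_drop]; ring_nf
      cases rem with
      | zero => simp [loopA]
      | succ r =>
        have hne : ¬ (((start + iN : Nat) : Int) = -1) := by omega
        simp only [loopA, hff, hne, if_false, if_neg hfind, Int.toNat_natCast]
        rw [hdrop]
        have hrec := ih (start + iN + f.length) r (by omega) (by omega)
        rw [hrec]
        have hpos : posB f.length start
            (List.take iN (List.drop start t) :: splitB (List.drop (start + iN + f.length) t) f fuel)
            = (start + iN) :: posB f.length (start + iN + f.length)
                (splitB (List.drop (start + iN + f.length) t) f fuel) := by
          obtain ⟨x, xs, hx⟩ := List.exists_cons_of_ne_nil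
            (splitB_ne_nil (List.drop (start + iN + f.length) t) f fuel)
          rw [hx]
          simp only [posB, htake]
        rw [hpos]
        simp only [List.take_succ_cons, List.map_cons]
        congr 1

-- ===== VERDICT (by name: the statement is the Claim_ definition above) =====
theorem find_snippets_spec : Claim_equal_find_snippets := by
  intro text feat window max_snips _
  unfold Spec_find_snippets find_snippets find_snippets_alt
  by_cases hf : feat.toList = []
  · simp [hf]
  · simp only [if_neg hf]
    have := loopA_eq text.toList feat.toList window hf (text.toList.length + 1) 0
      max_snips.toNat (by omega) (by omega)
    simpa using this
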